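-- pv_equiv track=rewrite | github.com/imkdir/QuoteApp | apps/backend/app/agents/analysis_mapper.py | _longest_contiguous_run
-- ===== SOURCE A (Python) =====
-- def _longest_contiguous_run(indexes: list[int]) -> int:
--     if not indexes:
--         return 0
--
--     longest = 1
--     current = 1
--     for previous, current_index in zip(indexes, indexes[1:]):
--         if current_index == previous + 1:
--             current += 1
--             longest = max(longest, current)
--         else:
--             current = 1
--
--     return longest
-- ===== SOURCE B (Python) =====
-- from itertools import groupby
--
--
-- def _longest_contiguous_run(indexes: list[int]) -> int:
--     # Positions in one maximal run of consecutive integers share the key value - index.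
--     return max(
--         (sum(1 for _ in group)
--          for _, group in groupby(enumerate(indexes), key=lambda pair: pair[1] - pair[0])),
--         default=0,
--     )
-- ===== Notes on version B (the rewrite author's own statement) =====
-- stated objective: idiomatic
-- what changed: Replaces the explicit streak counter with reset branch by grouping enumerate(indexes) with itertools.groupby on the invariant key value - index and taking the max group length (default 0).
import Mathlib
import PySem

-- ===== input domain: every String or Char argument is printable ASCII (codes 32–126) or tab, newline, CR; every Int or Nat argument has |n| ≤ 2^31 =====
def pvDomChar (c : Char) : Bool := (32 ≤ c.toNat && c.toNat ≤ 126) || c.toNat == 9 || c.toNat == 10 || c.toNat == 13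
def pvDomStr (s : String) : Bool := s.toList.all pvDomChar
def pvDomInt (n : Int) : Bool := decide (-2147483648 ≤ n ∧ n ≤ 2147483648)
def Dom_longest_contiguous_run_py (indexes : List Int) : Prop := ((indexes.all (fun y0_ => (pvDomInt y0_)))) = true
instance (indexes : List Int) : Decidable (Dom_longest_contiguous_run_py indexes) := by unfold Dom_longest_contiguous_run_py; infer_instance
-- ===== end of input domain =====

-- B replaces A's streak counter with a groupby on the key value − index; same cost, more idiomatic.

-- ===== PORT A =====
-- literal port of the streak-counter loop over zip(indexes, indexes[1:])
def longest_contiguous_run_py (indexes : List Int) : Int :=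
  if indexes = [] then 0
  else
    ((indexes.zip (PySem.List.slice indexes (some 1) none)).foldl
      (fun (st : Int × Int) pq =>
        if pq.2 = pq.1 + 1 then (max st.1 (st.2 + 1), st.2 + 1)
        else (st.1, 1))
      (1, 1)).1

-- ===== PORT B =====
-- groupby over adjacent equal keys: lengths of the maximal groups (port of
-- 'sum(1 for _ in group) for _, group in groupby(...)')
def pyGroupLens : Int → Int → List Int → List Int
  | _, n, [] => [n]
  | k, n, x :: xs => if x = k then pyGroupLens k (n + 1) xs else n :: pyGroupLens x 1 xs

def longest_contiguous_run_py_alt (indexes : List Int) : Int :=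
  match (PySem.List.enumerate indexes).map (fun p => p.2 - p.1) with
  | [] => 0
  | k :: ks => (PySem.List.max? (pyGroupLens k 1 ks) (fun x => x)).getD 0

-- ===== PRECONDITION & SPEC =====
def Spec_longest_contiguous_run_py (indexes : List Int) (out : Int) : Prop := out = longest_contiguous_run_py_alt indexes
instance (indexes : List Int) (out : Int) : Decidable (Spec_longest_contiguous_run_py indexes out) := by unfold Spec_longest_contiguous_run_py; infer_instance

-- ===== CLAIM (what is proved, stated in full; the proofs are below) =====
def Claim_equal_longest_contiguous_run_py : Prop := ∀ (indexes : List Int), Dom_longest_contiguous_run_py indexes → Spec_longest_contiguous_run_py indexes (longest_contiguous_run_py indexes)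

-- ===== LEMMAS AND PROOFS =====

-- A's loop, as structural recursion on the tail with the previous element carried along
def goA : List Int → Int → Int × Int → Int × Int
  | [], _, st => st
  | q :: qs, p, st => goA qs q (if q = p + 1 then (max st.1 (st.2 + 1), st.2 + 1) else (st.1, 1))

-- run lengths of maximal consecutive (+1) runs, value-based
def runsV : List Int → Int → Int → List Int
  | [], _, n => [n]
  | q :: qs, p, n => if q = p + 1 then runsV qs q (n + 1) else n :: runsV qs q 1

lemma foldA_eq_goA : ∀ (xs : List Int) (p : Int) (st : Int × Int),
    (((p :: xs).zip xs).foldl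
      (fun (st : Int × Int) pq =>
        if pq.2 = pq.1 + 1 then (max st.1 (st.2 + 1), st.2 + 1)
        else (st.1, 1)) st) = goA xs p st := by
  intro xs
  induction xs with
  | nil => intro p st; simp [goA]
  | cons q qs ih =>
      intro p st
      simp only [List.zip_cons_cons, List.foldl_cons, goA]
      exact ih q _

lemma runsV_head : ∀ (xs : List Int) (p n : Int), ∃ m t, runsV xs p n = m :: t ∧ n ≤ m := by
  intro xs
  induction xs with
  | nil => intro p n; exact ⟨n, [], rfl, le_refl n⟩
  | cons q qs ih =>
      intro p n
      by_cases h : q = p + 1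
      · obtain ⟨m, t, he, hle⟩ := ih q (n + 1)
        refine ⟨m, t, ?_, by omega⟩
        simp only [runsV]; rw [if_pos h, he]
      · refine ⟨n, runsV qs q 1, ?_, le_refl n⟩
        simp only [runsV]; rw [if_neg h]

lemma goA_eq_foldl_runsV : ∀ (xs : List Int) (p l c : Int), 1 ≤ c → c ≤ l →
    (goA xs p (l, c)).1 = (runsV xs p c).foldl max l := by
  intro xs
  induction xs with
  | nil =>
      intro p l c _ h2
      simp [goA, runsV, max_eq_left h2]
  | cons q qs ih =>
      intro p l c h1 h2
      by_cases h : q = p + 1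
      · simp only [goA, runsV]
        rw [if_pos h, if_pos h]
        rw [ih q (max l (c + 1)) (c + 1) (by omega) (le_max_right _ _)]
        obtain ⟨m, t, he, hle⟩ := runsV_head qs q (c + 1)
        rw [he]
        simp only [List.foldl_cons]
        congr 1
        omega
      · simp only [goA, runsV]
        rw [if_neg h, if_neg h]
        rw [ih q l 1 le_rfl (by omega)]
        simp only [List.foldl_cons, max_eq_left (by omega : c ≤ l)]

-- the key sequence v − i groups exactly like value-consecutiveness
lemma groupLens_keys : ∀ (xs : List Int) (p : Int) (i : Int) (n : Int),
    pyGroupLens (p - i) n ((PySem.List.enumerate xs (i + 1)).map (fun q => q.2 - q.1))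
      = runsV xs p n := by
  intro xs
  induction xs with
  | nil => intro p i n; simp [PySem.List.enumerate_nil, pyGroupLens, runsV]
  | cons q qs ih =>
      intro p i n
      simp only [PySem.List.enumerate_cons, List.map_cons, pyGroupLens, runsV]
      by_cases h : q = p + 1
      · have hk : q - (i + 1) = p - i := by omega
        rw [if_pos hk, if_pos h, ← hk]
        exact ih q (i + 1) (n + 1)
      · have hk : ¬ (q - (i + 1) = p - i) := by omega
        rw [if_neg hk, if_neg h, ← show q - (i + 1) = q - (i + 1) from rfl]
        exact congrArg (n :: ·) (ih q (i + 1) 1)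

-- ===== VERDICT (by name: the statement is the Claim_ definition above) =====
theorem longest_contiguous_run_py_spec : Claim_equal_longest_contiguous_run_py := by
  intro indexes _
  unfold Spec_longest_contiguous_run_py longest_contiguous_run_py longest_contiguous_run_py_alt
  cases indexes with
  | nil => simp [PySem.List.enumerate_nil]
  | cons x xs =>
      simp only [if_neg (List.cons_ne_nil x xs), PySem.List.slice_from_one, List.tail_cons,
        PySem.List.enumerate_cons, List.map_cons]
      rw [foldA_eq_goA]
      rw [groupLens_keys xs x 0 1]
      obtain ⟨m, t, he, hle⟩ := runsV_head xs x 1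
      rw [goA_eq_foldl_runsV xs x 1 1 le_rfl le_rfl, he,
        PySem.List.max?_id_cons]
      simp only [List.foldl_cons, Option.getD_some, max_eq_right hle]
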